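-- pv_equiv track=rewrite | github.com/Carlososuna11/codewars-handbook | python/kata/6-kyu/Corner Fill/solution.py | corner_fill
-- ===== SOURCE A (Python) =====
-- def corner_fill(square):
--     removeStarting = lambda x:  [y[:-1] for y in x[1:]]
--     corner = lambda x: x[0]+[y[-1] for y in x[1:]]
--     result =[]
--     n = len(square)
--     if n == 0: return []
--     for i in range(n):
--         if i % 2 ==0:
--             result = result + corner(square)
--         else:
--             result = result + corner(square)[::-1]
--         square = removeStarting(square)
--     return result
-- ===== SOURCE B (Python) =====
-- def corner_fill(square):
--     res = []
--     n = len(square)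
--     for i in range(n):
--         row = square[i]
--         seg = row[:len(row) - i] + [r[-(i + 1)] for r in square[i + 1:]]
--         res += seg if i % 2 == 0 else seg[::-1]
--     return res
-- ===== Notes on version B (the rewrite author's own statement) =====
-- stated objective: faster
-- what changed: B reads each layer directly from the original matrix by index (row i truncated by i, then the (i+1)-from-the-end element of each later row) instead of rebuilding a shrunken matrix with list slicing and concatenation on every iteration.
import Mathlib
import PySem

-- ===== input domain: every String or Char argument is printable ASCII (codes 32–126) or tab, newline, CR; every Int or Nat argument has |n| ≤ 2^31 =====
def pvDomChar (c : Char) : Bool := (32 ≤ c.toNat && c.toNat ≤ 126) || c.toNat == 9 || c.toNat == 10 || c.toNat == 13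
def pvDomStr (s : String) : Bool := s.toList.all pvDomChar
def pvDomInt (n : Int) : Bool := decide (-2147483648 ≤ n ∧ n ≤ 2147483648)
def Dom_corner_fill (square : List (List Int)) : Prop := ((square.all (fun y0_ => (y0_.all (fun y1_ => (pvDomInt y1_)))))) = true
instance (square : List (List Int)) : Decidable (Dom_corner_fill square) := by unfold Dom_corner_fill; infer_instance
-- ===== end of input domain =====

-- B reads each layer directly from the original matrix by index instead of rebuilding a
-- shrunken matrix each iteration; equivalence of return values is proved on Pre_.

-- ===== PORT A =====
-- removeStarting = lambda x: [y[:-1] for y in x[1:]]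
def pvRemoveStarting (x : List (List Int)) : List (List Int) :=
  (PySem.List.slice x (some 1) none).map (fun y => PySem.List.slice y none (some (-1)))

-- corner = lambda x: x[0] + [y[-1] for y in x[1:]]   (x[0]/y[-1] raise on empty; Pre_ excludes that)
def pvCorner (x : List (List Int)) : List Int :=
  ((PySem.List.pyGet? x 0).getD []) ++
    (PySem.List.slice x (some 1) none).map (fun y => (PySem.List.pyGet? y (-1)).getD 0)

def corner_fill (square : List (List Int)) : List Int :=
  let n := square.length
  if n = 0 then []
  else
    ((List.range n).foldl
      (fun (st : List Int × List (List Int)) i =>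
        ( if i % 2 = 0 then st.1 ++ pvCorner st.2
          else st.1 ++ ((PySem.List.slice? (pvCorner st.2) none none (-1)).getD []),
          pvRemoveStarting st.2))
      ([], square)).1

-- ===== PORT B =====
-- seg = row[:len(row)-i] + [r[-(i+1)] for r in square[i+1:]]
def pvSegB (square : List (List Int)) (i : Nat) : List Int :=
  let row := (PySem.List.pyGet? square (i : Int)).getD []
  PySem.List.slice row none (some ((row.length : Int) - (i : Int))) ++
    (PySem.List.slice square (some ((i : Int) + 1)) none).map
      (fun r => (PySem.List.pyGet? r (-((i : Int) + 1))).getD 0)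

def corner_fill_alt (square : List (List Int)) : List Int :=
  (List.range square.length).foldl
    (fun res i => res ++ (if i % 2 = 0 then pvSegB square i else (pvSegB square i).reverse))
    []

-- ===== PRECONDITION & SPEC =====
-- exactly the inputs on which Python A returns: row j must still be nonempty after j-1
-- column removals (otherwise y[-1] raises IndexError)
def Pre_corner_fill (square : List (List Int)) : Prop :=
  ∀ j < square.length, j ≤ (square.getD j []).length
instance (square : List (List Int)) : Decidable (Pre_corner_fill square) := by
  unfold Pre_corner_fill; infer_instance

def pvWitness_corner_fill : List (List Int) := [[1, 2], [3, 4]]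

def Spec_corner_fill (square : List (List Int)) (out : List Int) : Prop := out = corner_fill_alt square
instance (square : List (List Int)) (out : List Int) : Decidable (Spec_corner_fill square out) := by unfold Spec_corner_fill; infer_instance

-- ===== CLAIM (what is proved, stated in full; the proofs are below) =====
def Claim_equal_corner_fill : Prop := ∀ (square : List (List Int)), Dom_corner_fill square → Pre_corner_fill square → Spec_corner_fill square (corner_fill square)

-- ===== LEMMAS AND PROOFS =====

-- iterated removeStarting
def pvIter (k : Nat) (sq : List (List Int)) : List (List Int) :=
  match k with
  | 0 => sq
  | k + 1 => pvRemoveStarting (pvIter k sq)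

lemma pvRemoveStarting_eq (x : List (List Int)) :
    pvRemoveStarting x = x.tail.map List.dropLast := by
  simp [pvRemoveStarting, PySem.List.slice_from_one, PySem.List.slice_to_neg_one]

lemma dropLast_take_sub (r : List Int) (k : Nat) :
    (r.take (r.length - k)).dropLast = r.take (r.length - (k + 1)) := by
  rw [List.dropLast_eq_take, List.take_take, List.length_take]
  congr 1
  omega

lemma pvIter_eq (k : Nat) (sq : List (List Int)) :
    pvIter k sq = (sq.drop k).map (fun r => r.take (r.length - k)) := by
  induction k with
  | zero => simp [pvIter]
  | succ k ih =>
      rw [pvIter, ih, pvRemoveStarting_eq, ← List.map_tail, List.tail_drop, List.map_map]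
      congr 1
      funext r
      exact dropLast_take_sub r k

-- y[-1] of row k's truncation equals the original row's element at index -(k+1)
lemma pvTailElem (r : List Int) (k : Nat) :
    ((PySem.List.pyGet? (r.take (r.length - k)) (-1)).getD 0 : Int)
      = (PySem.List.pyGet? r (-((k : Int) + 1))).getD 0 := by
  by_cases h : r.length ≤ k
  · have h0 : r.length - k = 0 := by omega
    rw [h0, List.take_zero]
    have hc : -((k : Int) + 1) = -(((k+1 : Nat) : Int)) := by push_cast; ring
    rw [hc, (PySem.List.pyGet?_eq_none_iff r _).2]
    · rfl
    · simp [PySem.Raise.InRange]; omega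
  · have hc : -((k : Int) + 1) = -(((k+1 : Nat) : Int)) := by push_cast; ring
    rw [hc, PySem.List.pyGet?_neg_natCast r (k+1) (by omega) (by omega),
        PySem.List.pyGet?_neg_one, List.getLast?_eq_getElem?]
    simp only [List.length_take, List.getElem?_take]
    rw [if_pos (by omega)]
    have : min (r.length - k) r.length - 1 = r.length - (k + 1) := by omega
    rw [this]

lemma pvCorner_iter (sq : List (List Int)) (k : Nat)
    (hk : k < sq.length → k ≤ (sq.getD k []).length) :
    pvCorner (pvIter k sq) = pvSegB sq k := by
  rw [pvIter_eq]
  unfold pvCorner pvSegB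
  have hk1 : ((k : Int) + 1) = (((k+1 : Nat)) : Int) := by push_cast; ring
  rw [PySem.List.slice_from_one, hk1, PySem.List.slice_from_natCast]
  by_cases h : k < sq.length
  · have hrow : PySem.List.pyGet? sq (k : Int) = some sq[k] := by
      rw [PySem.List.pyGet?_natCast]; simp [List.getElem?_eq_getElem h]
    have hkl : k ≤ sq[k].length := by
      have := hk h; rwa [List.getD_eq_getElem?_getD, List.getElem?_eq_getElem h] at this
    have hM0 : PySem.List.pyGet? ((sq.drop k).map (fun r => r.take (r.length - k))) 0
        = some (sq[k].take (sq[k].length - k)) := by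
      have h00 : ((0:Int)) = ((0:Nat) : Int) := rfl
      rw [h00, PySem.List.pyGet?_natCast]
      simp [List.getElem?_map, List.getElem?_drop, List.getElem?_eq_getElem h]
    rw [hM0, hrow]
    simp only [Option.getD_some]
    have hcast : ((sq[k].length : Int) - (k : Int)) = (((sq[k].length - k : Nat)) : Int) := by
      omega
    rw [hcast, PySem.List.slice_to_natCast]
    congr 1
    rw [← List.map_tail, List.tail_drop, List.map_map]
    apply List.map_congr_left
    intro r _
    exact pvTailElem r k
  · have hdrop : sq.drop k = [] := List.drop_eq_nil_of_le (by omega)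
    have hdrop1 : sq.drop (k+1) = [] := List.drop_eq_nil_of_le (by omega)
    have hrow : PySem.List.pyGet? sq (k : Int) = none := by
      rw [PySem.List.pyGet?_natCast, List.getElem?_eq_none_iff.2 (by omega)]
    rw [hdrop, hdrop1, hrow]
    simp [PySem.List.pyGet?, PySem.List.slice]

lemma fold_eq (sq : List (List Int)) (hpre : Pre_corner_fill sq) (k : Nat) :
    (List.range k).foldl
      (fun (st : List Int × List (List Int)) i =>
        ( if i % 2 = 0 then st.1 ++ pvCorner st.2
          else st.1 ++ ((PySem.List.slice? (pvCorner st.2) none none (-1)).getD []),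
          pvRemoveStarting st.2))
      ([], sq)
    = ((List.range k).foldl
        (fun res i => res ++ (if i % 2 = 0 then pvSegB sq i else (pvSegB sq i).reverse)) [],
       pvIter k sq) := by
  induction k with
  | zero => simp [pvIter]
  | succ k ih =>
      rw [List.range_succ, List.foldl_append, List.foldl_append, ih]
      have hseg : pvCorner (pvIter k sq) = pvSegB sq k :=
        pvCorner_iter sq k (fun h => hpre k h)
      simp only [List.foldl_cons, List.foldl_nil, PySem.List.slice?_none_none_neg_one,
        Option.getD_some, hseg, pvIter]
      by_cases hp : k % 2 = 0 <;> simp [hp]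

-- ===== VERDICT (by name: the statement is the Claim_ definition above) =====
theorem corner_fill_spec : Claim_equal_corner_fill := by
  intro sq _ hpre
  unfold Spec_corner_fill corner_fill corner_fill_alt
  by_cases h : sq.length = 0
  · simp [h]
  · simp only [h, if_false]
    rw [fold_eq sq hpre]
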